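-- pv_equiv track=rewrite | github.com/vsai1242/ETL_FrameWrok | scripts/generate_columns_2_metadata.py | _expand_lakehouse_pairs
-- ===== SOURCE A (Python) =====
-- from typing import Dict, Iterable, List, Tuple
--
-- TARGET_DEFAULT = "LH_Finance"
--
-- def _split_csv_values(raw: object) -> List[str]:
--     value = str(raw or "").strip()
--     if not value:
--         return []
--     return [item.strip() for item in value.split(",") if item.strip()]
--
-- def _expand_lakehouse_pairs(row: Dict[str, object]) -> List[Tuple[str, str]]:
--     source_values = _split_csv_values(row.get("source_lakehouse", ""))
--     target_values = _split_csv_values(row.get("target_lakehouse", TARGET_DEFAULT))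
--
--     if not source_values:
--         source_values = [""]
--     if not target_values:
--         target_values = [TARGET_DEFAULT]
--
--     if len(source_values) == len(target_values):
--         return list(zip(source_values, target_values))
--     if len(source_values) == 1:
--         return [(source_values[0], target) for target in target_values]
--     if len(target_values) == 1:
--         return [(source, target_values[0]) for source in source_values]
--
--     test_id = str(row.get("test_id", "<unknown>"))
--     raise ValueError(
--         f"Invalid lakehouse mapping for {test_id}: source_lakehouse has {len(source_values)} values "
--         f"but target_lakehouse has {len(target_values)}. Use same count or one side as a single value."
--     )
-- ===== SOURCE B (Python) =====
-- TARGET_DEFAULT = "LH_Finance"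
--
-- def _split_csv_values(raw):
--     value = str(raw or "").strip()
--     if not value:
--         return []
--     return [item.strip() for item in value.split(",") if item.strip()]
--
-- def _pair_walk(source, target):
--     # Recursive co-walk over both nonempty lists: emit the heads as a pair,
--     # then shrink every side that still has more than one element left.
--     if len(source) == 1 and len(target) == 1:
--         return [(source[0], target[0])]
--     if len(source) == 1:
--         return [(source[0], target[0])] + _pair_walk(source, target[1:])
--     if len(target) == 1:
--         return [(source[0], target[0])] + _pair_walk(source[1:], target)
--     return [(source[0], target[0])] + _pair_walk(source[1:], target[1:])
--
-- def _expand_lakehouse_pairs(row):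
--     source = _split_csv_values(row.get("source_lakehouse", "")) or [""]
--     target = _split_csv_values(row.get("target_lakehouse", TARGET_DEFAULT)) or [TARGET_DEFAULT]
--     if len(source) != len(target) and len(source) != 1 and len(target) != 1:
--         test_id = str(row.get("test_id", "<unknown>"))
--         raise ValueError(
--             f"Invalid lakehouse mapping for {test_id}: source_lakehouse has {len(source)} values "
--             f"but target_lakehouse has {len(target)}. Use same count or one side as a single value."
--         )
--     return _pair_walk(source, target)
-- ===== Notes on version B (the rewrite author's own statement) =====
-- stated objective: alternative
-- what changed: A builds the pair list by choosing one of three whole-list constructions (zip of equal-length lists, or a comprehension broadcasting the singleton side); B validates once up front and then builds the pairs by a single recursive co-walk that always emits the two heads and advances every side that has more than one element remaining, so no zip/comprehension branch selection happens at all.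
import Mathlib
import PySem

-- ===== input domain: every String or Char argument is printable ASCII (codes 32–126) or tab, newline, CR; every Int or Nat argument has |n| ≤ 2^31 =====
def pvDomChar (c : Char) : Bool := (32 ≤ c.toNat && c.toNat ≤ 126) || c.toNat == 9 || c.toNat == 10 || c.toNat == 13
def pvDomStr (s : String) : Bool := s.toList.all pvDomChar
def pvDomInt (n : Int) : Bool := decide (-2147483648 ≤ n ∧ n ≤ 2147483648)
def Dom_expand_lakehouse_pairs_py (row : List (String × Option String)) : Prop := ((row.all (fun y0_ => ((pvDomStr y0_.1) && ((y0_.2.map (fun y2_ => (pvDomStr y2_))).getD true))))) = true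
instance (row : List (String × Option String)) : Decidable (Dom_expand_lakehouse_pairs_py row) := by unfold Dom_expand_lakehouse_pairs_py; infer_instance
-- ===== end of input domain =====

-- B replaces A's three whole-list constructions (zip / broadcast one side) by a single
-- recursive co-walk over both lists after one upfront validity check; objective: alternative
-- decomposition, same cost.

-- shared helper: port of _split_csv_values (both Pythons contain the identical helper)
def pvSplitCsv (raw : Option String) : List String :=
  -- `str(raw or "")`: None → "", a string stays itself (str of a str is itself)
  let value := PySem.Str.strip (raw.getD "")
  if value = "" then []
  -- split? never returns none here since the separator "," is nonempty
  else (((PySem.Str.split? value ",").getD []).map PySem.Str.strip).filter (fun x => x ≠ "")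

-- ===== PORT A =====
def expand_lakehouse_pairs_py (row : List (String × Option String)) : List (String × String) :=
  let source0 := pvSplitCsv ((PySem.Dict.get? ⟨row⟩ "source_lakehouse").getD (some ""))
  let target0 := pvSplitCsv ((PySem.Dict.get? ⟨row⟩ "target_lakehouse").getD (some "LH_Finance"))
  let source := if source0 = [] then [""] else source0
  let target := if target0 = [] then ["LH_Finance"] else target0
  if source.length = target.length then source.zip target
  else if source.length = 1 then target.map (fun t => (source.getD 0 "", t))
  else if target.length = 1 then source.map (fun s => (s, target.getD 0 ""))
  else []  -- Python raises ValueError here; excluded by Pre_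

-- ===== PORT B =====
-- port of _pair_walk: recursive co-walk, pattern-matched on the two lists
-- ([] cases are Python's IndexError on source[0]/target[0]; unreachable for the nonempty
-- lists _expand_lakehouse_pairs passes)
def pvPairWalk : List String → List String → List (String × String)
  | [a], [b] => [(a, b)]
  | [a], b :: t' => (a, b) :: pvPairWalk [a] t'
  | a :: s', [b] => (a, b) :: pvPairWalk s' [b]
  | a :: s', b :: t' => (a, b) :: pvPairWalk s' t'
  | _, _ => []

def expand_lakehouse_pairs_py_alt (row : List (String × Option String)) : List (String × String) :=
  let source0 := pvSplitCsv ((PySem.Dict.get? ⟨row⟩ "source_lakehouse").getD (some ""))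
  let target0 := pvSplitCsv ((PySem.Dict.get? ⟨row⟩ "target_lakehouse").getD (some "LH_Finance"))
  let source := if source0 = [] then [""] else source0
  let target := if target0 = [] then ["LH_Finance"] else target0
  if source.length ≠ target.length ∧ source.length ≠ 1 ∧ target.length ≠ 1 then
    []  -- Python raises ValueError here; excluded by Pre_
  else
    pvPairWalk source target

-- ===== PRECONDITION & SPEC =====
-- Pre_ excludes exactly the rows on which A raises ValueError (source and target expand to
-- different counts, neither a single value).
def Pre_expand_lakehouse_pairs_py (row : List (String × Option String)) : Prop :=
  let source0 := pvSplitCsv ((PySem.Dict.get? ⟨row⟩ "source_lakehouse").getD (some ""))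
  let target0 := pvSplitCsv ((PySem.Dict.get? ⟨row⟩ "target_lakehouse").getD (some "LH_Finance"))
  let source := if source0 = [] then [""] else source0
  let target := if target0 = [] then ["LH_Finance"] else target0
  source.length = target.length ∨ source.length = 1 ∨ target.length = 1
instance (row : List (String × Option String)) : Decidable (Pre_expand_lakehouse_pairs_py row) := by unfold Pre_expand_lakehouse_pairs_py; infer_instance

def pvWitness_expand_lakehouse_pairs_py : (List (String × Option String)) :=
  [("source_lakehouse", some "a , b"), ("target_lakehouse", some "x,y"), ("test_id", some "t1")]

def Spec_expand_lakehouse_pairs_py (row : List (String × Option String)) (out : List (String × String)) : Prop := out = expand_lakehouse_pairs_py_alt row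
instance (row : List (String × Option String)) (out : List (String × String)) : Decidable (Spec_expand_lakehouse_pairs_py row out) := by unfold Spec_expand_lakehouse_pairs_py; infer_instance

-- ===== CLAIM (what is proved, stated in full; the proofs are below) =====
def Claim_equal_expand_lakehouse_pairs_py : Prop := ∀ (row : List (String × Option String)), Dom_expand_lakehouse_pairs_py row → Pre_expand_lakehouse_pairs_py row → Spec_expand_lakehouse_pairs_py row (expand_lakehouse_pairs_py row)

-- ===== LEMMAS AND PROOFS =====

lemma pv_default_ne_nil (l : List String) (d : String) : (if l = [] then [d] else l) ≠ [] := by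
  split <;> simp_all

lemma pv_walk_left (a : String) (t : List String) (ht : t ≠ []) :
    pvPairWalk [a] t = t.map (fun tg => (a, tg)) := by
  induction t with
  | nil => exact absurd rfl ht
  | cons b t' ih =>
    cases t' with
    | nil => simp [pvPairWalk]
    | cons c t'' => simp [pvPairWalk, ih]

lemma pv_walk_right (b : String) (s : List String) (hs : s ≠ []) :
    pvPairWalk s [b] = s.map (fun sc => (sc, b)) := by
  induction s with
  | nil => exact absurd rfl hs
  | cons a s' ih =>
    cases s' with
    | nil => simp [pvPairWalk]
    | cons c s'' => simp [pvPairWalk, ih]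

lemma pv_walk_zip (s t : List String) (h : s.length = t.length) :
    pvPairWalk s t = s.zip t := by
  induction s generalizing t with
  | nil =>
    cases t with
    | nil => simp [pvPairWalk]
    | cons b t' => simp at h
  | cons a s' ih =>
    cases t with
    | nil => simp at h
    | cons b t' =>
      cases s' with
      | nil =>
        cases t' with
        | nil => simp [pvPairWalk]
        | cons c t'' => simp at h
      | cons c s'' =>
        cases t' with
        | nil => simp at h
        | cons d t'' =>
          have h' : (c :: s'').length = (d :: t'').length := by simpa using h
          simp only [pvPairWalk]
          rw [ih (d :: t'') h']
          simp

-- A's three branches equal B's validity check + co-walk, for nonempty lists under Pre_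
lemma pv_core (s t : List String) (hs : s ≠ []) (ht : t ≠ [])
    (pre : s.length = t.length ∨ s.length = 1 ∨ t.length = 1) :
    (if s.length = t.length then s.zip t
     else if s.length = 1 then t.map (fun tg => (s.getD 0 "", tg))
     else if t.length = 1 then s.map (fun sc => (sc, t.getD 0 ""))
     else []) =
    (if s.length ≠ t.length ∧ s.length ≠ 1 ∧ t.length ≠ 1 then []
     else pvPairWalk s t) := by
  have hR : (if s.length ≠ t.length ∧ s.length ≠ 1 ∧ t.length ≠ 1 then
      ([] : List (String × String)) else pvPairWalk s t) = pvPairWalk s t := if_neg (by tauto)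
  rw [hR]
  by_cases heq : s.length = t.length
  · rw [if_pos heq, pv_walk_zip s t heq]
  · rcases pre with h | h | h
    · exact absurd h heq
    · obtain ⟨a, rfl⟩ : ∃ a, s = [a] := by
        cases s with
        | nil => simp at h
        | cons a s' => cases s' with
          | nil => exact ⟨a, rfl⟩
          | cons c s'' => simp at h
      rw [if_neg heq, if_pos h, pv_walk_left a t ht]
      simp
    · obtain ⟨b, rfl⟩ : ∃ b, t = [b] := by
        cases t with
        | nil => simp at h
        | cons b t' => cases t' with
          | nil => exact ⟨b, rfl⟩
          | cons c t'' => simp at h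
      have hs1 : s.length ≠ 1 := by simpa using heq
      rw [if_neg heq, if_neg hs1, if_pos h, pv_walk_right b s hs]
      simp

-- ===== VERDICT (by name: the statement is the Claim_ definition above) =====
theorem expand_lakehouse_pairs_py_spec : Claim_equal_expand_lakehouse_pairs_py := by
  intro row _ pre
  unfold Spec_expand_lakehouse_pairs_py expand_lakehouse_pairs_py expand_lakehouse_pairs_py_alt
  unfold Pre_expand_lakehouse_pairs_py at pre
  exact pv_core _ _ (pv_default_ne_nil _ _) (pv_default_ne_nil _ _) pre
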